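-- pv_equiv track=rewrite | github.com/Bennyhwanggggg/Algorithm-and-Data-Structures-and-Coding-Challenges | Challenges/expressiveWords.py | check
-- ===== SOURCE A (Python) =====
-- def check(S, W):
--     """
--     In check function, use two pointer:
--
--     If S[i] == W[j], i++, j++
--     If S[i - 2] == S[i - 1] == S[i] or S[i - 1] == S[i] == S[i + 1], i++
--     else return false
--     """
--     j = 0
--     n, m = len(S), len(W)
--     for i in range(n):
--         if j < m and S[i] == W[j]:
--             j += 1
--         elif (S[i - 1:i + 2] != S[i] * 3) and (S[i] * 3 != S[i - 2:i + 1]):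
--             return False
--     return j == m
-- ===== SOURCE B (Python) =====
-- def _groups(s):
--     groups = []
--     i = 0
--     while i < len(s):
--         j = i + 1
--         while j < len(s) and s[j] == s[i]:
--             j += 1
--         groups.append((s[i], j - i))
--         i = j
--     return groups
--
--
-- def check(S, W):
--     gs = _groups(S)
--     gw = _groups(W)
--     if len(gs) != len(gw):
--         return False
--     for (cs, ns), (cw, nw) in zip(gs, gw):
--         if cs != cw:
--             return False
--         if ns != nw and not (ns >= 3 and ns >= nw):
--             return False
--     return True
-- ===== Notes on version B (the rewrite author's own statement) =====
-- stated objective: idiomatic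
-- what changed: Replaced the two-pointer scan with inline slice/lookback forgiveness checks by run-length encoding both strings into (char, count) groups and comparing the two group lists in lockstep.
import Mathlib
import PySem

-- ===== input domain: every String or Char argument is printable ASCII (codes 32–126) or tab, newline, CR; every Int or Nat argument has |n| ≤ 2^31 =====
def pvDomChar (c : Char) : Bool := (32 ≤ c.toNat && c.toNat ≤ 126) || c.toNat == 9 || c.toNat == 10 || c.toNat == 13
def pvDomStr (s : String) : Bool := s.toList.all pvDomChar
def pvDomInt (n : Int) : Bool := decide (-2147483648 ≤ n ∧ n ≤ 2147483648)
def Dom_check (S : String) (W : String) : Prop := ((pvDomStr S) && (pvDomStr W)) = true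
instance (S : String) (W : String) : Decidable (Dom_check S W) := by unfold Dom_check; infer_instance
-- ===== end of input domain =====

-- B re-implements the expressive-words check by run-length encoding both strings and
-- comparing the group lists in lockstep (idiomatic alternative to A's two-pointer scan
-- with inline slice lookback); proved to return the same Bool on every input.

-- ===== PORT A =====
-- the 'for i in range(n)' loop with state j and early return False;
-- 'j < m and S[i] == W[j]' is rendered as 'w[j]? = some s[i]' (none when j ≥ m),
-- the slices S[i-1:i+2] / S[i-2:i+1] via PySem.List.slice, S[i]*3 via List.replicate.
def checkLoop (s w : List Char) (i j : Nat) : Bool :=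
  if hi : i < s.length then
    if w[j]? = some s[i] then checkLoop s w (i + 1) (j + 1)
    else if PySem.List.slice s (some ((i : Int) - 1)) (some ((i : Int) + 2)) ≠ List.replicate 3 s[i] ∧
            List.replicate 3 s[i] ≠ PySem.List.slice s (some ((i : Int) - 2)) (some ((i : Int) + 1)) then
      false
    else checkLoop s w (i + 1) j
  else j == w.length
termination_by s.length - i

def check (S : String) (W : String) : Bool := checkLoop S.toList W.toList 0 0

-- ===== PORT B =====
-- _groups: outer while over runs; the inner 'while s[j] == s[i]' counting a run is
-- takeWhile/dropWhile on the rest of the list.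
def rle (s : List Char) : List (Char × Int) :=
  match s with
  | [] => []
  | c :: t => (c, 1 + ((t.takeWhile (· == c)).length : Int)) :: rle (t.dropWhile (· == c))
termination_by s.length
decreasing_by
  have := List.length_dropWhile_le (· == c) t
  simp; omega

-- the 'for … in zip(gs, gw)' loop with its two early returns
def groupsPass : List (Char × Int) → List (Char × Int) → Bool
  | (cs, ns) :: gs, (cw, nw) :: gw =>
    if cs ≠ cw then false
    else if ns ≠ nw ∧ ¬(3 ≤ ns ∧ nw ≤ ns) then false
    else groupsPass gs gw
  | _, _ => true

def check_alt (S : String) (W : String) : Bool :=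
  let gs := rle S.toList
  let gw := rle W.toList
  if gs.length ≠ gw.length then false else groupsPass gs gw

-- ===== PRECONDITION & SPEC =====
def Spec_check (S : String) (W : String) (out : Bool) : Prop := out = check_alt S W
instance (S : String) (W : String) (out : Bool) : Decidable (Spec_check S W out) := by unfold Spec_check; infer_instance

-- ===== CLAIM (what is proved, stated in full; the proofs are below) =====
def Claim_equal_check : Prop := ∀ (S : String) (W : String), Dom_check S W → Spec_check S W (check S W)

-- ===== LEMMAS AND PROOFS =====

-- fused form of B's length-check + zip loop, convenient for the induction
def g : List (Char × Int) → List (Char × Int) → Bool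
  | [], [] => true
  | [], _ :: _ => false
  | _ :: _, [] => false
  | (c, k) :: gs, (d, l) :: gw =>
    if c = d ∧ (k = l ∨ (3 ≤ k ∧ l ≤ k)) then g gs gw else false

theorem g_eq_pass : ∀ gs gw : List (Char × Int),
    (if gs.length ≠ gw.length then false else groupsPass gs gw) = g gs gw := by
  intro gs
  induction gs with
  | nil => intro gw; cases gw <;> simp [groupsPass, g]
  | cons p gs ih =>
    intro gw
    cases gw with
    | nil => simp [g]
    | cons q gw =>
      obtain ⟨c, k⟩ := p
      obtain ⟨d, l⟩ := q
      simp only [show (((c, k) :: gs).length ≠ ((d, l) :: gw).length) ↔ (gs.length ≠ gw.length) from by simp]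
      by_cases hlen : gs.length = gw.length
      · rw [if_neg (show ¬ gs.length ≠ gw.length by tauto)]
        show groupsPass _ _ = _
        by_cases hcd : c = d
        · by_cases hkl : k = l ∨ (3 ≤ k ∧ l ≤ k)
          · rw [groupsPass, if_neg (show ¬ c ≠ d by tauto),
              if_neg (show ¬ (k ≠ l ∧ ¬(3 ≤ k ∧ l ≤ k)) by tauto),
              g, if_pos ⟨hcd, hkl⟩, ← ih gw, if_neg (show ¬ gs.length ≠ gw.length by tauto)]
          · rw [groupsPass, if_neg (show ¬ c ≠ d by tauto),
              if_pos (show k ≠ l ∧ ¬(3 ≤ k ∧ l ≤ k) by tauto), g, if_neg (by tauto)]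
        · rw [groupsPass, if_pos (show c ≠ d by tauto), g, if_neg (by tauto)]
      · rw [if_pos (show gs.length ≠ gw.length by tauto), g]
        by_cases hc : c = d ∧ (k = l ∨ 3 ≤ k ∧ l ≤ k)
        · rw [if_pos hc, ← ih gw, if_pos (show gs.length ≠ gw.length by tauto)]
        · rw [if_neg hc]

-- takeWhile (· == c) read through getElem?
theorem tw_get (u : List Char) (c : Char) :
    ∀ a, a < (u.takeWhile (· == c)).length → u[a]? = some c := by
  induction u with
  | nil => simp
  | cons x t ih =>
    intro a ha
    by_cases h : x == c
    · rw [List.takeWhile_cons, if_pos h] at ha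
      cases a with
      | zero => simpa using (eq_of_beq h)
      | succ b =>
        simp only [List.length_cons] at ha
        simpa using ih b (by omega)
    · rw [List.takeWhile_cons, if_neg h] at ha
      simp at ha

theorem tw_bound (u : List Char) (c : Char) :
    u[(u.takeWhile (· == c)).length]? ≠ some c := by
  induction u with
  | nil => simp
  | cons x t ih =>
    by_cases h : x == c
    · rw [List.takeWhile_cons, if_pos h]
      simpa using ih
    · rw [List.takeWhile_cons, if_neg h]
      simp only [List.length_nil, List.getElem?_cons_zero]
      intro e
      exact h (by simp [Option.some.inj e])

theorem tw_len_le (u : List Char) (c : Char) :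
    (u.takeWhile (· == c)).length ≤ u.length := by
  induction u with
  | nil => simp
  | cons x t ih =>
    rw [List.takeWhile_cons]
    by_cases h : x == c
    · rw [if_pos h]; simpa using ih
    · rw [if_neg h]; simp

theorem tw_drop (u : List Char) (c : Char) :
    u.dropWhile (· == c) = u.drop (u.takeWhile (· == c)).length := by
  induction u with
  | nil => rfl
  | cons x t ih =>
    rw [List.dropWhile_cons, List.takeWhile_cons]
    by_cases h : x == c
    · rw [if_pos h, if_pos h]; simpa using ih
    · rw [if_neg h, if_neg h]; simp

-- slice arithmetic
theorem slice3_eq (xs : List Char) (a : ℕ) :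
    PySem.List.slice xs (some (a : Int)) (some ((a : Int) + 3)) = (xs.drop a).take 3 := by
  have h : ((a : Int) + 3) = ((a + 3 : ℕ) : Int) := by push_cast; ring
  rw [h, PySem.List.slice_natCast]
  congr 1
  omega

theorem front_slice (s : List Char) (p : ℕ) (hp : 1 ≤ p) :
    PySem.List.slice s (some ((p : Int) - 1)) (some ((p : Int) + 2)) = (s.drop (p - 1)).take 3 := by
  have h1 : (p : Int) - 1 = ((p - 1 : ℕ) : Int) := by omega
  have h2 : (p : Int) + 2 = ((p - 1 : ℕ) : Int) + 3 := by omega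
  rw [h1, h2, slice3_eq]

theorem back_slice (s : List Char) (p : ℕ) (hp : 2 ≤ p) :
    PySem.List.slice s (some ((p : Int) - 2)) (some ((p : Int) + 1)) = (s.drop (p - 2)).take 3 := by
  have h1 : (p : Int) - 2 = ((p - 2 : ℕ) : Int) := by omega
  have h2 : (p : Int) + 1 = ((p - 2 : ℕ) : Int) + 3 := by omega
  rw [h1, h2, slice3_eq]

theorem slice_ne_rep_of_stop_le2 (xs : List Char) (a : Int) (b : ℕ) (hb : b ≤ 2) (c : Char) :
    PySem.List.slice xs (some a) (some (b : Int)) ≠ List.replicate 3 c := by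
  intro e
  have h := congrArg List.length e
  rw [PySem.List.length_slice, PySem.List.clampIdx_natCast, List.length_replicate] at h
  have hm : min b xs.length ≤ b := min_le_left _ _
  omega

theorem take3_ne_rep (xs : List Char) (a t : ℕ) (ht : t < 3) (c : Char)
    (h : xs[a + t]? ≠ some c) : (xs.drop a).take 3 ≠ List.replicate 3 c := by
  intro e
  apply h
  have h2 := congrArg (fun l => l[t]?) e
  interval_cases t <;> simpa [List.getElem?_take, List.getElem?_drop] using h2

theorem take3_eq_rep (xs : List Char) (a : ℕ) (c : Char)
    (h0 : xs[a]? = some c) (h1 : xs[a + 1]? = some c) (h2 : xs[a + 2]? = some c) :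
    (xs.drop a).take 3 = List.replicate 3 c := by
  apply List.ext_getElem?
  intro m
  by_cases hm : m < 3
  · interval_cases m <;>
      simp_all [List.getElem?_drop]
  · have hlen : ((xs.drop a).take 3).length ≤ 3 := by
      simp [List.length_take]
    rw [List.getElem?_eq_none (by omega), List.getElem?_eq_none (by simp; omega)]

-- one-step unfoldings of A's loop
theorem checkLoop_step (s w : List Char) (i j : ℕ) (hi : i < s.length) :
    checkLoop s w i j =
      if w[j]? = some (s[i]'hi) then checkLoop s w (i + 1) (j + 1)
      else if PySem.List.slice s (some ((i : Int) - 1)) (some ((i : Int) + 2)) ≠ List.replicate 3 (s[i]'hi) ∧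
              List.replicate 3 (s[i]'hi) ≠ PySem.List.slice s (some ((i : Int) - 2)) (some ((i : Int) + 1)) then
        false
      else checkLoop s w (i + 1) j := by
  rw [checkLoop, dif_pos hi]

theorem checkLoop_end (s w : List Char) (i j : ℕ) (hi : ¬ i < s.length) :
    checkLoop s w i j = (j == w.length) := by
  rw [checkLoop, dif_neg hi]

theorem step_match (s w : List Char) (c : Char) (i j : ℕ)
    (hs : s[i]? = some c) (hw : w[j]? = some c) :
    checkLoop s w i j = checkLoop s w (i + 1) (j + 1) := by
  obtain ⟨hi, hv⟩ := List.getElem?_eq_some_iff.mp hs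
  rw [checkLoop_step s w i j hi, if_pos (by rw [hv]; exact hw)]

theorem steps_match (s w : List Char) (c : Char) :
    ∀ t i j, (∀ a, a < t → s[i + a]? = some c) → (∀ a, a < t → w[j + a]? = some c) →
    checkLoop s w i j = checkLoop s w (i + t) (j + t) := by
  intro t
  induction t with
  | zero => intro i j _ _; simp
  | succ t ih =>
    intro i j hs hw
    have h0 : checkLoop s w i j = checkLoop s w (i + 1) (j + 1) :=
      step_match s w c i j (by simpa using hs 0 (by omega)) (by simpa using hw 0 (by omega))
    rw [h0, ih (i + 1) (j + 1)
      (fun a ha => by have := hs (a + 1) (by omega); rwa [show i + (a + 1) = i + 1 + a by omega] at this)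
      (fun a ha => by have := hw (a + 1) (by omega); rwa [show j + (a + 1) = j + 1 + a by omega] at this)]
    congr 1 <;> omega

theorem step_skip (s w : List Char) (i j : ℕ) (hi : i < s.length)
    (hnw : w[j]? ≠ some (s[i]'hi))
    (hsl : PySem.List.slice s (some ((i : Int) - 1)) (some ((i : Int) + 2)) = List.replicate 3 (s[i]'hi) ∨
           PySem.List.slice s (some ((i : Int) - 2)) (some ((i : Int) + 1)) = List.replicate 3 (s[i]'hi)) :
    checkLoop s w i j = checkLoop s w (i + 1) j := by
  rw [checkLoop_step s w i j hi, if_neg hnw, if_neg (by tauto)]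

theorem step_fail (s w : List Char) (i j : ℕ) (hi : i < s.length)
    (hnw : w[j]? ≠ some (s[i]'hi))
    (h1 : PySem.List.slice s (some ((i : Int) - 1)) (some ((i : Int) + 2)) ≠ List.replicate 3 (s[i]'hi))
    (h2 : PySem.List.slice s (some ((i : Int) - 2)) (some ((i : Int) + 1)) ≠ List.replicate 3 (s[i]'hi)) :
    checkLoop s w i j = false := by
  rw [checkLoop_step s w i j hi, if_neg hnw, if_pos ⟨h1, fun e => h2 e.symm⟩]

theorem loop_terminal (s w : List Char) (i j : ℕ) (hi : s.length ≤ i) (hj : j ≤ w.length) :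
    checkLoop s w i j = g (rle (s.drop i)) (rle (w.drop j)) := by
  rw [checkLoop_end s w i j (by omega), List.drop_eq_nil_iff.mpr hi]
  cases hwd : w.drop j with
  | nil =>
    have h1 : w.length ≤ j := List.drop_eq_nil_iff.mp hwd
    have h2 : j = w.length := by omega
    simp [rle, g, h2]
  | cons d t =>
    have h1 : ¬ w.length ≤ j := fun h => by simp [List.drop_eq_nil_iff.mpr h] at hwd
    rw [rle, rle]
    simp only [g]
    simp [show j ≠ w.length from by omega]

theorem loop_eq (s w : List Char) :
    ∀ (fuel i j : ℕ), s.length ≤ i + fuel → j ≤ w.length →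
    (1 ≤ i → ∀ (_ : i < s.length), s[i - 1]? ≠ s[i]?) →
    checkLoop s w i j = g (rle (s.drop i)) (rle (w.drop j)) := by
  intro fuel
  induction fuel with
  | zero =>
    intro i j hf hj _
    exact loop_terminal s w i j (by omega) hj
  | succ fuel ih =>
    intro i j hf hj hprev
    by_cases hi : i < s.length
    case neg => exact loop_terminal s w i j (by omega) hj
    case pos =>
    obtain ⟨c, hc⟩ : ∃ c, s[i]'hi = c := ⟨_, rfl⟩
    have hi0 : s[i]? = some c := by rw [List.getElem?_eq_getElem hi, hc]
    obtain ⟨q, hq⟩ : ∃ q, ((s.drop (i + 1)).takeWhile (· == c)).length = q := ⟨_, rfl⟩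
    obtain ⟨l, hl⟩ : ∃ l, ((w.drop j).takeWhile (· == c)).length = l := ⟨_, rfl⟩
    -- S-side run facts
    have F1 : ∀ a, a < q + 1 → s[i + a]? = some c := by
      intro a ha
      cases a with
      | zero => simpa using hi0
      | succ b =>
        have h := tw_get (s.drop (i + 1)) c b (by omega)
        rw [List.getElem?_drop] at h
        rwa [show i + (b + 1) = i + 1 + b by omega]
    have F3 : s[i + (q + 1)]? ≠ some c := by
      have h := tw_bound (s.drop (i + 1)) c
      rw [List.getElem?_drop, hq] at h
      rwa [show i + (q + 1) = i + 1 + q by omega]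
    have F2 : i + (q + 1) ≤ s.length := by
      have h1 := tw_len_le (s.drop (i + 1)) c
      have h2 : (s.drop (i + 1)).length = s.length - (i + 1) := by simp
      omega
    have F4 : s.drop (i + (q + 1)) = (s.drop (i + 1)).dropWhile (· == c) := by
      rw [tw_drop, hq, show i + (q + 1) = i + 1 + q by omega, ← List.drop_drop]
    have FS : rle (s.drop i) = (c, 1 + (q : Int)) :: rle (s.drop (i + (q + 1))) := by
      rw [List.drop_eq_getElem_cons hi, hc, rle, hq, F4]
    -- W-side facts
    have G1 : ∀ a, a < l → w[j + a]? = some c := by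
      intro a ha
      have h := tw_get (w.drop j) c a (by omega)
      rwa [List.getElem?_drop] at h
    have G3 : w[j + l]? ≠ some c := by
      have h := tw_bound (w.drop j) c
      rwa [List.getElem?_drop, hl] at h
    have G2 : j + l ≤ w.length := by
      have h1 := tw_len_le (w.drop j) c
      have h2 : (w.drop j).length = w.length - j := by simp
      omega
    have G4 : 1 ≤ l → rle (w.drop j) = (c, (l : Int)) :: rle (w.drop (j + l)) := by
      intro h1
      have hwj : w[j]? = some c := by simpa using G1 0 (by omega)
      obtain ⟨hjm, hwv⟩ := List.getElem?_eq_some_iff.mp hwj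
      have hd : w.drop j = c :: w.drop (j + 1) := by
        rw [List.drop_eq_getElem_cons hjm, hwv]
      have htw : ((w.drop (j + 1)).takeWhile (· == c)).length = l - 1 := by
        rw [← hl, hd, List.takeWhile_cons, if_pos (by simp)]
        simp
      rw [hd, rle, htw, tw_drop, htw,
        show (w.drop (j + 1)).drop (l - 1) = w.drop (j + l) from by
          rw [List.drop_drop]; congr 1; omega]
      congr 2
      omega
    -- case split on the run length k = q+1 of S at i versus the match length l in W at j
    by_cases hlk : q + 1 ≤ l
    · -- whole run matches
      rw [steps_match s w c (q + 1) i j (fun a ha => F1 a ha) (fun a ha => G1 a (by omega))]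
      by_cases heq : q + 1 = l
      · have hprev' : 1 ≤ i + (q + 1) → ∀ _ : i + (q + 1) < s.length,
            s[i + (q + 1) - 1]? ≠ s[i + (q + 1)]? := by
          intro _ _
          have ha : s[i + (q + 1) - 1]? = some c := by
            have h := F1 q (by omega)
            rwa [show i + (q + 1) - 1 = i + q from by omega]
          rw [ha]
          intro e; exact F3 e.symm
        rw [ih (i + (q + 1)) (j + (q + 1)) (by omega) (by omega) hprev']
        rw [FS, G4 (by omega), g, if_pos ⟨rfl, Or.inl (by omega)⟩,
          show j + (q + 1) = j + l from by omega]
      · -- W's group is longer: both sides False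
        have hlt : q + 1 < l := by omega
        have hw2 : w[j + (q + 1)]? = some c := G1 (q + 1) (by omega)
        have hRHS : g (rle (s.drop i)) (rle (w.drop j)) = false := by
          rw [FS, G4 (by omega), g, if_neg (by rintro ⟨-, h | ⟨-, h⟩⟩ <;> omega)]
        rw [hRHS]
        by_cases hik : i + (q + 1) < s.length
        · have hd : s[i + (q + 1)]? = some (s[i + (q + 1)]'hik) := List.getElem?_eq_getElem hik
          have hdc : s[i + (q + 1)]'hik ≠ c := by intro e; exact F3 (by rw [hd, e])
          apply step_fail s w (i + (q + 1)) (j + (q + 1)) hik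
          · rw [hw2]; intro e; exact hdc (Option.some.inj e).symm
          · rw [front_slice s (i + (q + 1)) (by omega)]
            apply take3_ne_rep s (i + (q + 1) - 1) 0 (by omega)
            rw [show i + (q + 1) - 1 + 0 = i + q from by omega, F1 q (by omega)]
            intro e; exact hdc (Option.some.inj e).symm
          · by_cases hp2 : 2 ≤ i + (q + 1)
            · rw [back_slice s (i + (q + 1)) hp2]
              apply take3_ne_rep s (i + (q + 1) - 2) 1 (by omega)
              rw [show i + (q + 1) - 2 + 1 = i + q from by omega, F1 q (by omega)]
              intro e; exact hdc (Option.some.inj e).symm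
            · rw [show ((↑(i + (q + 1)) : Int) + 1) = ((2 : ℕ) : Int) from by omega]
              exact slice_ne_rep_of_stop_le2 s _ 2 (by omega) _
        · rw [checkLoop_end s w _ _ hik]
          simp [show j + (q + 1) ≠ w.length from by omega]
    · -- only a prefix of the run matches
      have hlq : l < q + 1 := by omega
      rw [steps_match s w c l i j (fun a ha => F1 a (by omega)) (fun a ha => G1 a ha)]
      have hil : i + l < s.length := by omega
      have hval : s[i + l]'hil = c := by
        have h := F1 l (by omega)
        rw [List.getElem?_eq_getElem hil] at h
        exact Option.some.inj h
      by_cases hl0 : l = 0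
      · -- the unmatched char is the first of its run: A fails, B sees a char/None mismatch
        have hRHS : g (rle (s.drop i)) (rle (w.drop j)) = false := by
          rw [FS]
          cases hwd : w.drop j with
          | nil => simp [rle, g]
          | cons d t =>
            have hdc : ¬ (d == c) := by
              intro h
              rw [hwd, List.takeWhile_cons, if_pos h] at hl
              simp at hl
              omega
            rw [rle, g, if_neg (by rintro ⟨e, -⟩; exact hdc (by simp [e]))]
        rw [hRHS]
        apply step_fail s w (i + l) (j + l) hil
        · rw [hval]; exact G3
        · rw [hval]
          by_cases hp1 : 1 ≤ i + l
          · rw [front_slice s (i + l) hp1]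
            apply take3_ne_rep s (i + l - 1) 0 (by omega)
            rw [show i + l - 1 + 0 = i - 1 from by omega]
            have h := hprev (by omega) hi
            rwa [hi0] at h
          · rw [show ((↑(i + l) : Int) + 2) = ((2 : ℕ) : Int) from by omega]
            exact slice_ne_rep_of_stop_le2 s _ 2 (by omega) _
        · rw [hval]
          by_cases hp2 : 2 ≤ i + l
          · rw [back_slice s (i + l) hp2]
            apply take3_ne_rep s (i + l - 2) 1 (by omega)
            rw [show i + l - 2 + 1 = i - 1 from by omega]
            have h := hprev (by omega) hi
            rwa [hi0] at h
          · rw [show ((↑(i + l) : Int) + 1) = (((i + l + 1) : ℕ) : Int) from by push_cast; ring]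
            exact slice_ne_rep_of_stop_le2 s _ (i + l + 1) (by omega) _
      · have hl1 : 1 ≤ l := by omega
        by_cases hk3 : 3 ≤ q + 1
        · -- run of length ≥ 3: remaining chars are forgiven, then recurse
          have chain : ∀ d t, l ≤ t → t + d = q + 1 →
              checkLoop s w (i + t) (j + l) = checkLoop s w (i + (q + 1)) (j + l) := by
            intro d
            induction d with
            | zero => intro t h1 h2; rw [show t = q + 1 from by omega]
            | succ d ihd =>
              intro t h1 h2
              have htq : t < q + 1 := by omega
              have hpv : s[i + t]? = some c := F1 t htq
              obtain ⟨hpl, hpe⟩ := List.getElem?_eq_some_iff.mp hpv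
              have hone : checkLoop s w (i + t) (j + l) = checkLoop s w (i + t + 1) (j + l) := by
                apply step_skip s w (i + t) (j + l) hpl (by rw [hpe]; exact G3)
                rw [hpe]
                by_cases h2t : 2 ≤ t
                · right
                  rw [back_slice s (i + t) (by omega)]
                  apply take3_eq_rep
                  · rw [show i + t - 2 = i + (t - 2) from by omega]; exact F1 (t - 2) (by omega)
                  · rw [show i + t - 2 + 1 = i + (t - 1) from by omega]; exact F1 (t - 1) (by omega)
                  · rw [show i + t - 2 + 2 = i + t from by omega]; exact hpv
                · left
                  rw [front_slice s (i + t) (by omega)]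
                  apply take3_eq_rep
                  · rw [show i + t - 1 = i + 0 from by omega]; exact F1 0 (by omega)
                  · rw [show i + t - 1 + 1 = i + 1 from by omega]; exact F1 1 (by omega)
                  · rw [show i + t - 1 + 2 = i + 2 from by omega]; exact F1 2 (by omega)
              rw [hone, show i + t + 1 = i + (t + 1) from by omega, ihd (t + 1) (by omega) (by omega)]
          rw [chain (q + 1 - l) l (le_refl l) (by omega)]
          have hprev' : 1 ≤ i + (q + 1) → ∀ _ : i + (q + 1) < s.length,
              s[i + (q + 1) - 1]? ≠ s[i + (q + 1)]? := by
            intro _ _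
            have ha : s[i + (q + 1) - 1]? = some c := by
              have h := F1 q (by omega)
              rwa [show i + (q + 1) - 1 = i + q from by omega]
            rw [ha]
            intro e; exact F3 e.symm
          rw [ih (i + (q + 1)) (j + l) (by omega) (by omega) hprev']
          rw [FS, G4 (by omega), g, if_pos ⟨rfl, Or.inr ⟨by omega, by omega⟩⟩]
        · -- run of length exactly 2 with l = 1: the second char is not forgiven
          have hq1 : q = 1 := by omega
          have hRHS : g (rle (s.drop i)) (rle (w.drop j)) = false := by
            rw [FS, G4 (by omega), g, if_neg (by rintro ⟨-, h | ⟨h, -⟩⟩ <;> omega)]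
          rw [hRHS]
          apply step_fail s w (i + l) (j + l) hil
          · rw [hval]; exact G3
          · rw [hval, front_slice s (i + l) (by omega)]
            apply take3_ne_rep s (i + l - 1) 2 (by omega)
            rw [show i + l - 1 + 2 = i + (q + 1) from by omega]
            exact F3
          · rw [hval]
            by_cases hp2 : 2 ≤ i + l
            · rw [back_slice s (i + l) hp2]
              apply take3_ne_rep s (i + l - 2) 0 (by omega)
              rw [show i + l - 2 + 0 = i - 1 from by omega]
              have h := hprev (by omega) hi
              rwa [hi0] at h
            · rw [show ((↑(i + l) : Int) + 1) = ((2 : ℕ) : Int) from by omega]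
              exact slice_ne_rep_of_stop_le2 s _ 2 (by omega) _

-- ===== VERDICT (by name: the statement is the Claim_ definition above) =====
theorem check_spec : Claim_equal_check := by
  intro S W _
  show check S W = check_alt S W
  rw [check, loop_eq S.toList W.toList S.toList.length 0 0 (by omega) (by omega)
    (fun h _ => absurd h (by omega))]
  simp only [List.drop_zero]
  rw [← g_eq_pass]
  rfl
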